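-- pv_equiv track=rewrite | github.com/trishajanath/AltX | backend/layout_design_scraper.py | _parse_layout_prompt
-- ===== SOURCE A (Python) =====
-- from typing import Dict, List, Any, Tuple, Optional
--
-- def _parse_layout_prompt(prompt: str) -> Dict[str, Any]:
--     """Parse natural language prompt for layout requirements."""
--     prompt_lower = prompt.lower()
--     requirements = {}
--
--     # Color detection
--     if any(color in prompt_lower for color in ['dark', 'black', 'midnight']):
--         requirements['color_scheme'] = 'dark'
--     elif any(color in prompt_lower for color in ['light', 'white', 'bright']):
--         requirements['color_scheme'] = 'light'
--     elif 'futuristic' in prompt_lower: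
--         requirements['color_scheme'] = 'futuristic'
--     elif 'neon' in prompt_lower:
--         requirements['color_scheme'] = 'neon'
--
--     # Style detection
--     if 'glassmorphism' in prompt_lower or 'glass' in prompt_lower:
--         requirements['visual_style'] = 'glassmorphism'
--     elif 'brutalist' in prompt_lower or 'brutal' in prompt_lower:
--         requirements['visual_style'] = 'brutalist'
--     elif 'minimal' in prompt_lower or 'clean' in prompt_lower:
--         requirements['visual_style'] = 'minimal'
--     elif 'organic' in prompt_lower or 'flowing' in prompt_lower:
--         requirements['visual_style'] = 'organic'
--
--     # Layout type detection
--     if 'grid' in prompt_lower: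
--         requirements['layout_type'] = 'grid'
--     elif 'cards' in prompt_lower or 'masonry' in prompt_lower:
--         requirements['layout_type'] = 'masonry'
--     elif 'fullscreen' in prompt_lower or 'immersive' in prompt_lower:
--         requirements['layout_type'] = 'fullscreen'
--
--     return requirements
-- ===== SOURCE B (Python) =====
-- # B: collect-then-aggregate — one pass collects every (index, category, value) keyword hit
-- # from a flat keyword table, then each category's value is the hit with the minimal index.
-- _KW = [
--     ('dark', 'color_scheme', 'dark'), ('black', 'color_scheme', 'dark'), ('midnight', 'color_scheme', 'dark'),
--     ('light', 'color_scheme', 'light'), ('white', 'color_scheme', 'light'), ('bright', 'color_scheme', 'light'),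
--     ('futuristic', 'color_scheme', 'futuristic'),
--     ('neon', 'color_scheme', 'neon'),
--     ('glassmorphism', 'visual_style', 'glassmorphism'), ('glass', 'visual_style', 'glassmorphism'),
--     ('brutalist', 'visual_style', 'brutalist'), ('brutal', 'visual_style', 'brutalist'),
--     ('minimal', 'visual_style', 'minimal'), ('clean', 'visual_style', 'minimal'),
--     ('organic', 'visual_style', 'organic'), ('flowing', 'visual_style', 'organic'),
--     ('grid', 'layout_type', 'grid'),
--     ('cards', 'layout_type', 'masonry'), ('masonry', 'layout_type', 'masonry'),
--     ('fullscreen', 'layout_type', 'fullscreen'), ('immersive', 'layout_type', 'fullscreen'),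
-- ]
--
-- def _parse_layout_prompt(prompt: str):
--     p = prompt.lower()
--     hits = [(i, cat, val) for i, (kw, cat, val) in enumerate(_KW) if kw in p]
--     out = {}
--     for cat in ('color_scheme', 'visual_style', 'layout_type'):
--         ranked = [(i, val) for i, c, val in hits if c == cat]
--         if ranked:
--             out[cat] = min(ranked, key=lambda t: t[0])[1]
--     return out
-- ===== Notes on version B (the rewrite author's own statement) =====
-- stated objective: alternative
-- what changed: Replaced the three hand-coded first-match if/elif chains by a collect-then-aggregate scheme: one pass collects every (index, category, value) keyword hit from a flat table, then each category's value is taken from the minimal-index hit.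
import Mathlib
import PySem

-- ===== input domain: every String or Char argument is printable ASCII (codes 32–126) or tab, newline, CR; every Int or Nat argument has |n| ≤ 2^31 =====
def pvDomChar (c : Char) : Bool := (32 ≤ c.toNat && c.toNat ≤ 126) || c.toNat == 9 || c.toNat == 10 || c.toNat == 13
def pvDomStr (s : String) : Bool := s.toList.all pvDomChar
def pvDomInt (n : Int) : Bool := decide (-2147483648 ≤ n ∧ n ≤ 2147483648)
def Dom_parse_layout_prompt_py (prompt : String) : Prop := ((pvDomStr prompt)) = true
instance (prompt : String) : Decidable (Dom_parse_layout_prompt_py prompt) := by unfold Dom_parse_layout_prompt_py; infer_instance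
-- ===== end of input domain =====

-- B replaces A's three if/elif chains by a collect-then-aggregate scheme: one pass collects
-- every keyword hit with its index from a flat table, then each category takes the minimal-index hit (objective: alternative).


-- ===== PORT A =====
def parse_layout_prompt_py (prompt : String) : List (String × String) :=
  let pl := PySem.Str.lower prompt
  let requirements : PySem.Dict String String := PySem.Dict.empty
  -- Color detection
  let requirements :=
    if ["dark", "black", "midnight"].any (fun color => PySem.Str.isIn color pl) then
      requirements.insert "color_scheme" "dark"
    else if ["light", "white", "bright"].any (fun color => PySem.Str.isIn color pl) then
      requirements.insert "color_scheme" "light"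
    else if PySem.Str.isIn "futuristic" pl then
      requirements.insert "color_scheme" "futuristic"
    else if PySem.Str.isIn "neon" pl then
      requirements.insert "color_scheme" "neon"
    else requirements
  -- Style detection
  let requirements :=
    if PySem.Str.isIn "glassmorphism" pl || PySem.Str.isIn "glass" pl then
      requirements.insert "visual_style" "glassmorphism"
    else if PySem.Str.isIn "brutalist" pl || PySem.Str.isIn "brutal" pl then
      requirements.insert "visual_style" "brutalist"
    else if PySem.Str.isIn "minimal" pl || PySem.Str.isIn "clean" pl then
      requirements.insert "visual_style" "minimal"
    else if PySem.Str.isIn "organic" pl || PySem.Str.isIn "flowing" pl then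
      requirements.insert "visual_style" "organic"
    else requirements
  -- Layout type detection
  let requirements :=
    if PySem.Str.isIn "grid" pl then
      requirements.insert "layout_type" "grid"
    else if PySem.Str.isIn "cards" pl || PySem.Str.isIn "masonry" pl then
      requirements.insert "layout_type" "masonry"
    else if PySem.Str.isIn "fullscreen" pl || PySem.Str.isIn "immersive" pl then
      requirements.insert "layout_type" "fullscreen"
    else requirements
  requirements.items

-- ===== PORT B =====
-- flat keyword table _KW of Source B: (keyword, category, value)
def pvKW : List (String × String × String) :=
  [ ("dark", "color_scheme", "dark"), ("black", "color_scheme", "dark"), ("midnight", "color_scheme", "dark"),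
    ("light", "color_scheme", "light"), ("white", "color_scheme", "light"), ("bright", "color_scheme", "light"),
    ("futuristic", "color_scheme", "futuristic"),
    ("neon", "color_scheme", "neon"),
    ("glassmorphism", "visual_style", "glassmorphism"), ("glass", "visual_style", "glassmorphism"),
    ("brutalist", "visual_style", "brutalist"), ("brutal", "visual_style", "brutalist"),
    ("minimal", "visual_style", "minimal"), ("clean", "visual_style", "minimal"),
    ("organic", "visual_style", "organic"), ("flowing", "visual_style", "organic"),
    ("grid", "layout_type", "grid"),
    ("cards", "layout_type", "masonry"), ("masonry", "layout_type", "masonry"),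
    ("fullscreen", "layout_type", "fullscreen"), ("immersive", "layout_type", "fullscreen") ]

def parse_layout_prompt_py_alt (prompt : String) : List (String × String) :=
  let p := PySem.Str.lower prompt
  -- hits = [(i, cat, val) for i, (kw, cat, val) in enumerate(_KW) if kw in p]
  let hits := (PySem.List.enumerate pvKW).filterMap
      (fun e => if PySem.Str.isIn e.2.1 p then some (e.1, e.2.2.1, e.2.2.2) else none)
  (["color_scheme", "visual_style", "layout_type"].foldl
    (fun (out : PySem.Dict String String) cat =>
      -- ranked = [(i, val) for i, c, val in hits if c == cat]
      let ranked := hits.filterMap (fun t => if t.2.1 == cat then some (t.1, t.2.2) else none)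
      -- min(ranked, key=lambda t: t[0])[1]
      match PySem.List.min? ranked (fun t => t.1) with
      | some m => out.insert cat m.2
      | none => out) PySem.Dict.empty).items

-- ===== PRECONDITION & SPEC =====
def Spec_parse_layout_prompt_py (prompt : String) (out : List (String × String)) : Prop := out = parse_layout_prompt_py_alt prompt
instance (prompt : String) (out : List (String × String)) : Decidable (Spec_parse_layout_prompt_py prompt out) := by unfold Spec_parse_layout_prompt_py; infer_instance

-- ===== CLAIM (what is proved, stated in full; the proofs are below) =====
def Claim_equal_parse_layout_prompt_py : Prop := ∀ (prompt : String), Dom_parse_layout_prompt_py prompt → Spec_parse_layout_prompt_py prompt (parse_layout_prompt_py prompt)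

-- ===== LEMMAS AND PROOFS =====
-- proof-side helpers: A's three stages, and B's per-category step
def pvA1 (pl : String) (d : PySem.Dict String String) : PySem.Dict String String :=
  if ["dark", "black", "midnight"].any (fun color => PySem.Str.isIn color pl) then d.insert "color_scheme" "dark"
  else if ["light", "white", "bright"].any (fun color => PySem.Str.isIn color pl) then d.insert "color_scheme" "light"
  else if PySem.Str.isIn "futuristic" pl then d.insert "color_scheme" "futuristic"
  else if PySem.Str.isIn "neon" pl then d.insert "color_scheme" "neon"
  else d
def pvA2 (pl : String) (d : PySem.Dict String String) : PySem.Dict String String :=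
  if PySem.Str.isIn "glassmorphism" pl || PySem.Str.isIn "glass" pl then d.insert "visual_style" "glassmorphism"
  else if PySem.Str.isIn "brutalist" pl || PySem.Str.isIn "brutal" pl then d.insert "visual_style" "brutalist"
  else if PySem.Str.isIn "minimal" pl || PySem.Str.isIn "clean" pl then d.insert "visual_style" "minimal"
  else if PySem.Str.isIn "organic" pl || PySem.Str.isIn "flowing" pl then d.insert "visual_style" "organic"
  else d
def pvA3 (pl : String) (d : PySem.Dict String String) : PySem.Dict String String :=
  if PySem.Str.isIn "grid" pl then d.insert "layout_type" "grid"
  else if PySem.Str.isIn "cards" pl || PySem.Str.isIn "masonry" pl then d.insert "layout_type" "masonry"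
  else if PySem.Str.isIn "fullscreen" pl || PySem.Str.isIn "immersive" pl then d.insert "layout_type" "fullscreen"
  else d

set_option maxHeartbeats 1000000

def pvStep (p : String) (d : PySem.Dict String String) (cat : String) : PySem.Dict String String :=
  match PySem.List.min? (((PySem.List.enumerate pvKW).filterMap
      (fun e => if PySem.Str.isIn e.2.1 p then some (e.1, e.2.2.1, e.2.2.2) else none)).filterMap
      (fun t => if t.2.1 == cat then some (t.1, t.2.2) else none)) (fun t => t.1) with
  | some m => d.insert cat m.2
  | none => d

theorem hA (prompt : String) : parse_layout_prompt_py prompt =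
    (pvA3 (PySem.Str.lower prompt) (pvA2 (PySem.Str.lower prompt) (pvA1 (PySem.Str.lower prompt) PySem.Dict.empty))).items := rfl

theorem hB (prompt : String) : parse_layout_prompt_py_alt prompt =
    (pvStep (PySem.Str.lower prompt) (pvStep (PySem.Str.lower prompt) (pvStep (PySem.Str.lower prompt) PySem.Dict.empty "color_scheme") "visual_style") "layout_type").items := rfl

theorem ite_some_bind {α β : Type} (b : Bool) (x : α) (g : α → Option β) :
    ((if b then some x else none).bind g) = if b then g x else none := by cases b <;> rfl

theorem match_min (l : List (Int × String)) (cat : String) (d : PySem.Dict String String) :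
    (match PySem.List.min? l (fun t => t.1) with
     | some m => d.insert cat m.2
     | none => d) = (PySem.List.min? l (fun t => t.1)).elim d (fun m => d.insert cat m.2) := by
  cases PySem.List.min? l (fun t => t.1) <;> rfl

theorem s1 (p : String) (d : PySem.Dict String String) : pvStep p d "color_scheme" = pvA1 p d := by
  unfold pvStep pvA1
  rw [List.filterMap_filterMap, List.filterMap_eq_flatMap_toList]
  simp only [pvKW, PySem.List.enumerate_cons, PySem.List.enumerate_nil,
    List.flatMap_cons, List.flatMap_nil, ite_some_bind]
  simp [apply_ite Option.toList]
  rw [match_min]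
  by_cases h1 : PySem.Chars.isIn ['d','a','r','k'] p.toList = true <;>
  by_cases h2 : PySem.Chars.isIn ['b','l','a','c','k'] p.toList = true <;>
  by_cases h3 : PySem.Chars.isIn ['m','i','d','n','i','g','h','t'] p.toList = true <;>
  by_cases h4 : PySem.Chars.isIn ['l','i','g','h','t'] p.toList = true <;>
  by_cases h5 : PySem.Chars.isIn ['w','h','i','t','e'] p.toList = true <;>
  by_cases h6 : PySem.Chars.isIn ['b','r','i','g','h','t'] p.toList = true <;>
  by_cases h7 : PySem.Chars.isIn ['f','u','t','u','r','i','s','t','i','c'] p.toList = true <;>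
  by_cases h8 : PySem.Chars.isIn ['n','e','o','n'] p.toList = true <;>
  simp [h1, h2, h3, h4, h5, h6, h7, h8] <;> rfl

theorem s2 (p : String) (d : PySem.Dict String String) : pvStep p d "visual_style" = pvA2 p d := by
  unfold pvStep pvA2
  rw [List.filterMap_filterMap, List.filterMap_eq_flatMap_toList]
  simp only [pvKW, PySem.List.enumerate_cons, PySem.List.enumerate_nil,
    List.flatMap_cons, List.flatMap_nil, ite_some_bind]
  simp [apply_ite Option.toList]
  rw [match_min]
  by_cases h1 : PySem.Chars.isIn ['g','l','a','s','s','m','o','r','p','h','i','s','m'] p.toList = true <;>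
  by_cases h2 : PySem.Chars.isIn ['g','l','a','s','s'] p.toList = true <;>
  by_cases h3 : PySem.Chars.isIn ['b','r','u','t','a','l','i','s','t'] p.toList = true <;>
  by_cases h4 : PySem.Chars.isIn ['b','r','u','t','a','l'] p.toList = true <;>
  by_cases h5 : PySem.Chars.isIn ['m','i','n','i','m','a','l'] p.toList = true <;>
  by_cases h6 : PySem.Chars.isIn ['c','l','e','a','n'] p.toList = true <;>
  by_cases h7 : PySem.Chars.isIn ['o','r','g','a','n','i','c'] p.toList = true <;>
  by_cases h8 : PySem.Chars.isIn ['f','l','o','w','i','n','g'] p.toList = true <;>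
  simp [h1, h2, h3, h4, h5, h6, h7, h8] <;> rfl

theorem s3 (p : String) (d : PySem.Dict String String) : pvStep p d "layout_type" = pvA3 p d := by
  unfold pvStep pvA3
  rw [List.filterMap_filterMap, List.filterMap_eq_flatMap_toList]
  simp only [pvKW, PySem.List.enumerate_cons, PySem.List.enumerate_nil,
    List.flatMap_cons, List.flatMap_nil, ite_some_bind]
  simp [apply_ite Option.toList]
  rw [match_min]
  by_cases h1 : PySem.Chars.isIn ['g','r','i','d'] p.toList = true <;>
  by_cases h2 : PySem.Chars.isIn ['c','a','r','d','s'] p.toList = true <;>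
  by_cases h3 : PySem.Chars.isIn ['m','a','s','o','n','r','y'] p.toList = true <;>
  by_cases h4 : PySem.Chars.isIn ['f','u','l','l','s','c','r','e','e','n'] p.toList = true <;>
  by_cases h5 : PySem.Chars.isIn ['i','m','m','e','r','s','i','v','e'] p.toList = true <;>
  simp [h1, h2, h3, h4, h5] <;> rfl

-- ===== VERDICT (by name: the statement is the Claim_ definition above) =====
theorem parse_layout_prompt_py_spec : Claim_equal_parse_layout_prompt_py := by
  intro prompt _
  unfold Spec_parse_layout_prompt_py
  rw [hA, hB, s1, s2, s3]
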